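-- pv_equiv track=rewrite | github.com/cry999/AtCoder | exawizards/2019/C.py | snuke_the_wizard
-- ===== SOURCE A (Python) =====
-- def snuke_the_wizard(N: int, Q: int, s: str, queries: list)->int:
--     l, r = -1, N
--     for t, d in reversed(queries):
--         if d == 'R':
--             if 0 <= r-1 and s[r-1] == t:
--                 r -= 1
--             if 0 <= l and s[l] == t:
--                 l -= 1
--         else:
--             if l + 1 < N and s[l+1] == t:
--                 l += 1
--             if r < N and s[r] == t:
--                 r += 1
--     return r - l - 1 if l < r else 0
-- ===== SOURCE B (Python) =====
-- def snuke_the_wizard(N: int, Q: int, s: str, queries: list) -> int: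
--     # Forward-simulate one golem from start p; -1 = fell off left, 1 = fell off right, 0 = survives.
--     def fate(p):
--         for t, d in queries:
--             if s[p] == t:
--                 p = p + 1 if d == 'R' else p - 1
--                 if p < 0:
--                     return -1
--                 if p >= N:
--                     return 1
--         return 0
--
--     if N <= 0:
--         return 0
--
--     # pred(a) holds, pred(b) fails: return the smallest x in (a, b] where pred fails.
--     def boundary(pred, a, b):
--         while b - a > 1:
--             m = (a + b) // 2
--             if pred(m):
--                 a = m
--             else:
--                 b = m
--         return b
--
--     # survivors form a contiguous block: fates are monotone in the start square
--     if fate(0) != -1: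
--         lo = 0
--     elif fate(N - 1) == -1:
--         lo = N
--     else:
--         lo = boundary(lambda p: fate(p) == -1, 0, N - 1)
--     if fate(N - 1) != 1:
--         hi = N - 1
--     elif fate(0) == 1:
--         hi = -1
--     else:
--         hi = boundary(lambda p: fate(p) != 1, 0, N - 1) - 1
--     return hi - lo + 1 if lo <= hi else 0
-- ===== Notes on version B (the rewrite author's own statement) =====
-- stated objective: alternative
-- what changed: A tracks the survivor boundary pair (l,r) by scanning the queries in reverse once; B instead forward-simulates a single golem from a given start square and binary-searches for the first start that does not fall off the left and the first that falls off the right, using monotonicity of the fate in the start square.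
-- outside the precondition, e.g. on snuke_the_wizard(5, 1, 'ab', [('x', 'L')]): A returns 5, B raises IndexError
import Mathlib
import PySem

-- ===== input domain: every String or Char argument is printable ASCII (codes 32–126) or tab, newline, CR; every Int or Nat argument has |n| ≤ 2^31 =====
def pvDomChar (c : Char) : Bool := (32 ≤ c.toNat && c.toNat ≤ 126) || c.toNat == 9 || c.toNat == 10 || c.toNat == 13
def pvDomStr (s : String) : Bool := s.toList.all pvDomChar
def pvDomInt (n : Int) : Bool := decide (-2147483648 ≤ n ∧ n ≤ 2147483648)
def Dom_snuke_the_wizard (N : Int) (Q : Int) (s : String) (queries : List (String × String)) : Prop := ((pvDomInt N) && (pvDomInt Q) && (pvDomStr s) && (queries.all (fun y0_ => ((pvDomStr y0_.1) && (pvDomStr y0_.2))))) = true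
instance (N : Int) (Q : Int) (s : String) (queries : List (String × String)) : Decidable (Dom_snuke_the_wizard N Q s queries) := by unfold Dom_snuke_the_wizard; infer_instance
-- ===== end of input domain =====

-- B replaces A's reverse scan maintaining the boundary pair (l,r) by a forward per-start
-- simulation plus two binary searches over the (monotone) fate of the start square;
-- objective: alternative algorithm (not faster: A is a single O(Q) pass).


-- ===== PORT A =====
-- Python's `s[i] == t` (s[i] a one-char string; IndexError mapped to false — the guards of
-- both programs keep every evaluated index in range on Pre_, so this is exact there).
def chEq (cs : List Char) (i : Int) (t : String) : Bool :=
  match PySem.List.pyGet? cs i with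
  | some c => String.ofList [c] == t
  | none => false

-- one reversed query applied to the boundary pair (l, r); the two updates of A's branch are
-- independent (each reads only the old l, r), so they are written as one pair
def stepA (cs : List Char) (N : Int) (st : Int × Int) (q : String × String) : Int × Int :=
  if q.2 == "R" then
    (if 0 ≤ st.1 ∧ chEq cs st.1 q.1 = true then st.1 - 1 else st.1,
     if 0 ≤ st.2 - 1 ∧ chEq cs (st.2 - 1) q.1 = true then st.2 - 1 else st.2)
  else
    (if st.1 + 1 < N ∧ chEq cs (st.1 + 1) q.1 = true then st.1 + 1 else st.1,
     if st.2 < N ∧ chEq cs st.2 q.1 = true then st.2 + 1 else st.2)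

def snuke_the_wizard (N : Int) (Q : Int) (s : String) (queries : List (String × String)) : Int :=
  let st := (queries.reverse).foldl (stepA s.toList N) (-1, N)
  if st.1 < st.2 then st.2 - st.1 - 1 else 0

-- ===== PORT B =====
-- forward simulation of one golem from start square p: -1 fell off left, 1 fell off right, 0 survives
def fateB (cs : List Char) (N : Int) : List (String × String) → Int → Int
  | [], _ => 0
  | q :: rest, p =>
    if chEq cs p q.1 = true then
      if (if q.2 == "R" then p + 1 else p - 1) < 0 then -1
      else if N ≤ (if q.2 == "R" then p + 1 else p - 1) then 1
      else fateB cs N rest (if q.2 == "R" then p + 1 else p - 1)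
    else fateB cs N rest p

-- B's `boundary`: pred holds at a, fails at b; smallest x in (a,b] where pred fails
def bsearchB (f : Int → Bool) (a b : Int) : Int :=
  if b - a > 1 then
    if f (PySem.Int.floordiv (a + b) 2) then bsearchB f (PySem.Int.floordiv (a + b) 2) b
    else bsearchB f a (PySem.Int.floordiv (a + b) 2)
  else b
termination_by (b - a).toNat
decreasing_by
  all_goals
    have hm : a < PySem.Int.floordiv (a + b) 2 ∧ PySem.Int.floordiv (a + b) 2 < b := by
      rw [PySem.Int.floordiv_eq_ediv_of_pos (by norm_num : (0:Int) < 2)]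
      omega
    omega

def snuke_the_wizard_alt (N : Int) (Q : Int) (s : String) (queries : List (String × String)) : Int :=
  if N ≤ 0 then 0
  else
    let cs := s.toList
    let lo :=
      if fateB cs N queries 0 ≠ -1 then 0
      else if fateB cs N queries (N - 1) = -1 then N
      else bsearchB (fun p => fateB cs N queries p == -1) 0 (N - 1)
    let hi :=
      if fateB cs N queries (N - 1) ≠ 1 then N - 1
      else if fateB cs N queries 0 = 1 then -1
      else bsearchB (fun p => fateB cs N queries p != 1) 0 (N - 1) - 1
    if lo ≤ hi then hi - lo + 1 else 0

-- ===== PRECONDITION & SPEC =====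
-- Pre_ excludes N > len(s) with nonempty queries: there the Python A reads s[N-1] (or walks
-- past the string) and usually raises IndexError, though on degenerate query lists that never
-- touch an out-of-range square it still returns a value (see claim cites); B raises there too.
def Pre_snuke_the_wizard (N : Int) (Q : Int) (s : String) (queries : List (String × String)) : Prop :=
  N ≤ PySem.Str.len s ∨ queries = []
instance (N : Int) (Q : Int) (s : String) (queries : List (String × String)) : Decidable (Pre_snuke_the_wizard N Q s queries) := by unfold Pre_snuke_the_wizard; infer_instance

def pvWitness_snuke_the_wizard : Int × Int × String × (List (String × String)) :=
  (3, 1, "abc", [("a", "L")])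

def Spec_snuke_the_wizard (N : Int) (Q : Int) (s : String) (queries : List (String × String)) (out : Int) : Prop := out = snuke_the_wizard_alt N Q s queries
instance (N : Int) (Q : Int) (s : String) (queries : List (String × String)) (out : Int) : Decidable (Spec_snuke_the_wizard N Q s queries out) := by unfold Spec_snuke_the_wizard; infer_instance

-- ===== CLAIM (what is proved, stated in full; the proofs are below) =====
def Claim_equal_snuke_the_wizard : Prop := ∀ (N : Int) (Q : Int) (s : String) (queries : List (String × String)), Dom_snuke_the_wizard N Q s queries → Pre_snuke_the_wizard N Q s queries → Spec_snuke_the_wizard N Q s queries (snuke_the_wizard N Q s queries)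

-- ===== LEMMAS AND PROOFS =====

-- A's state after processing the reversed query list
def stA (cs : List Char) (N : Int) (qs : List (String × String)) : Int × Int :=
  (qs.reverse).foldl (stepA cs N) (-1, N)

lemma stepA_fixed (cs : List Char) (N : Int) (hN : N ≤ 0) (q : String × String) :
    stepA cs N (-1, N) q = (-1, N) := by
  unfold stepA
  split_ifs <;> simp_all <;> omega

lemma foldl_fixed (cs : List Char) (N : Int) (hN : N ≤ 0) :
    ∀ xs : List (String × String), xs.foldl (stepA cs N) (-1, N) = (-1, N) := by
  intro xs
  induction xs with
  | nil => rfl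
  | cons x xs ih => simp [List.foldl, stepA_fixed cs N hN x, ih]

lemma stA_cons (cs : List Char) (N : Int) (q : String × String) (rest : List (String × String)) :
    stA cs N (q :: rest) = stepA cs N (stA cs N rest) q := by
  simp [stA, List.reverse_cons, List.foldl_append]

-- the key invariant: A's pair (l, r) classifies every start square's forward fate
lemma charac (cs : List Char) (N : Int) (hN : 0 ≤ N) :
    ∀ qs : List (String × String),
      -1 ≤ (stA cs N qs).1 ∧ (stA cs N qs).1 < (stA cs N qs).2 ∧ (stA cs N qs).2 ≤ N ∧
      ∀ p : Int, 0 ≤ p → p < N →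
        (fateB cs N qs p = -1 ↔ p ≤ (stA cs N qs).1) ∧
        (fateB cs N qs p = 1 ↔ (stA cs N qs).2 ≤ p) := by
  intro qs
  induction qs with
  | nil =>
    refine ⟨le_refl _, by simp [stA]; omega, by simp [stA], ?_⟩
    intro p hp hpN
    simp only [fateB, stA, List.reverse_nil, List.foldl_nil]
    constructor <;> constructor <;> intro h <;> omega
  | cons q rest ih =>
    obtain ⟨t, d⟩ := q
    obtain ⟨h1, h2, h3, h4⟩ := ih
    rw [stA_cons]
    set l := (stA cs N rest).1 with hldef
    set r := (stA cs N rest).2 with hrdef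
    by_cases hd : (d == "R") = true
    · -- d == 'R'
      simp only [stepA, hd, if_true]
      have hA1 : ∀ p : Int, 0 ≤ p → chEq cs p t = true →
          ((p ≤ if 0 ≤ l ∧ chEq cs l t = true then l - 1 else l) ↔ p + 1 ≤ l) := by
        intro p hp hcp
        split_ifs with hL
        · omega
        · rcases eq_or_ne p l with rfl | hne
          · exact absurd ⟨hp, hcp⟩ hL
          · omega
      have hA2 : ∀ p : Int, 0 ≤ p → chEq cs p t = true →
          (((if 0 ≤ r - 1 ∧ chEq cs (r - 1) t = true then r - 1 else r) ≤ p) ↔ r ≤ p + 1) := by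
        intro p hp hcp
        split_ifs with hR
        · omega
        · rcases eq_or_ne p (r - 1) with he | hne
          · exact absurd ⟨by omega, he ▸ hcp⟩ hR
          · omega
      have hB1 : ∀ p : Int, chEq cs p t = false →
          ((p ≤ if 0 ≤ l ∧ chEq cs l t = true then l - 1 else l) ↔ p ≤ l) := by
        intro p hcp
        split_ifs with hL
        · rcases eq_or_ne p l with rfl | hne
          · rw [hL.2] at hcp; cases hcp
          · omega
        · omega
      have hB2 : ∀ p : Int, chEq cs p t = false →
          (((if 0 ≤ r - 1 ∧ chEq cs (r - 1) t = true then r - 1 else r) ≤ p) ↔ r ≤ p) := by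
        intro p hcp
        split_ifs with hR
        · rcases eq_or_ne p (r - 1) with he | hne
          · rw [← he] at hR; rw [hR.2] at hcp; cases hcp
          · omega
        · omega
      refine ⟨?_, ?_, ?_, ?_⟩
      · split_ifs with hL <;> omega
      · split_ifs with hL hR hR
        · omega
        · omega
        · rcases eq_or_ne l (r - 1) with he | hne
          · simp only [← hldef, ← hrdef] at hL hR
            exact absurd ⟨by omega, by rw [he]; exact hR.2⟩ hL
          · omega
        · omega
      · split_ifs with hR <;> omega
      · intro p hp hpN
        by_cases hcp : chEq cs p t = true
        · simp only [fateB, hcp, hd, if_true]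
          rw [if_neg (by omega : ¬ (p + 1 < 0))]
          by_cases hN1 : N ≤ p + 1
          · rw [if_pos hN1]
            refine ⟨?_, ?_⟩
            · rw [hA1 p hp hcp]; omega
            · rw [hA2 p hp hcp]; omega
          · rw [if_neg hN1]
            have ihp := h4 (p + 1) (by omega) (by omega)
            refine ⟨?_, ?_⟩
            · rw [hA1 p hp hcp, ihp.1]
            · rw [hA2 p hp hcp, ihp.2]
        · have hcpf : chEq cs p t = false := by simpa using hcp
          simp only [fateB, hcpf, Bool.false_eq_true, if_false]
          rw [hB1 p hcpf, hB2 p hcpf]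
          exact h4 p hp hpN
    · -- d != 'R' (the else branch, Python's 'L' case)
      have hdf : (d == "R") = false := by simpa using hd
      simp only [stepA, hdf, Bool.false_eq_true, if_false]
      have hC1 : ∀ p : Int, p < N → chEq cs p t = true →
          ((p ≤ if l + 1 < N ∧ chEq cs (l + 1) t = true then l + 1 else l) ↔ p ≤ l + 1) := by
        intro p hpN hcp
        split_ifs with hL
        · omega
        · rcases eq_or_ne p (l + 1) with he | hne
          · exact absurd ⟨by omega, he ▸ hcp⟩ hL
          · omega
      have hC2 : ∀ p : Int, p < N → chEq cs p t = true →
          (((if r < N ∧ chEq cs r t = true then r + 1 else r) ≤ p) ↔ r + 1 ≤ p) := by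
        intro p hpN hcp
        split_ifs with hR
        · omega
        · rcases eq_or_ne p r with rfl | hne
          · exact absurd ⟨hpN, hcp⟩ hR
          · omega
      have hD1 : ∀ p : Int, chEq cs p t = false →
          ((p ≤ if l + 1 < N ∧ chEq cs (l + 1) t = true then l + 1 else l) ↔ p ≤ l) := by
        intro p hcp
        split_ifs with hL
        · rcases eq_or_ne p (l + 1) with he | hne
          · rw [← he] at hL; rw [hL.2] at hcp; cases hcp
          · omega
        · omega
      have hD2 : ∀ p : Int, chEq cs p t = false →
          (((if r < N ∧ chEq cs r t = true then r + 1 else r) ≤ p) ↔ r ≤ p) := by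
        intro p hcp
        split_ifs with hR
        · rcases eq_or_ne p r with rfl | hne
          · rw [hR.2] at hcp; cases hcp
          · omega
        · omega
      refine ⟨?_, ?_, ?_, ?_⟩
      · split_ifs with hL <;> omega
      · split_ifs with hL hR hR
        · omega
        · rcases eq_or_ne (l + 1) r with he | hne
          · simp only [← hldef, ← hrdef] at hL hR
            exact absurd ⟨by omega, by rw [← he]; exact hL.2⟩ hR
          · omega
        · omega
        · omega
      · split_ifs with hR <;> omega
      · intro p hp hpN
        by_cases hcp : chEq cs p t = true
        · simp only [fateB, hcp, hdf, Bool.false_eq_true, if_true, if_false]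
          by_cases hp0 : p - 1 < 0
          · rw [if_pos hp0]
            refine ⟨?_, ?_⟩
            · rw [hC1 p hpN hcp]; omega
            · rw [hC2 p hpN hcp]; omega
          · rw [if_neg hp0, if_neg (by omega : ¬ (N ≤ p - 1))]
            have ihp := h4 (p - 1) (by omega) (by omega)
            refine ⟨?_, ?_⟩
            · rw [hC1 p hpN hcp, ihp.1]; omega
            · rw [hC2 p hpN hcp, ihp.2]; omega
        · have hcpf : chEq cs p t = false := by simpa using hcp
          simp only [fateB, hcpf, Bool.false_eq_true, if_false]
          rw [hD1 p hcpf, hD2 p hcpf]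
          exact h4 p hp hpN

-- binary-search correctness against an exact threshold predicate
lemma bsearchB_eq (f : Int → Bool) (L lo0 hi0 : Int)
    (h : ∀ p : Int, lo0 ≤ p → p ≤ hi0 → (f p = true ↔ p ≤ L)) :
    ∀ n : Nat, ∀ a b : Int, (b - a).toNat ≤ n → lo0 ≤ a → b ≤ hi0 → a ≤ L → L < b →
      bsearchB f a b = L + 1 := by
  intro n
  induction n with
  | zero => intro a b hn ha hb haL hLb; exfalso; omega
  | succ n ihn =>
    intro a b hn ha hb haL hLb
    rw [bsearchB]
    by_cases hab : b - a > 1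
    · rw [if_pos hab]
      have hm : a < PySem.Int.floordiv (a + b) 2 ∧ PySem.Int.floordiv (a + b) 2 < b := by
        rw [PySem.Int.floordiv_eq_ediv_of_pos (by norm_num : (0:Int) < 2)]
        omega
      by_cases hfm : f (PySem.Int.floordiv (a + b) 2) = true
      · rw [if_pos hfm]
        exact ihn _ b (by omega) (by omega) hb ((h _ (by omega) (by omega)).1 hfm) hLb
      · rw [if_neg hfm]
        have hLm : L < PySem.Int.floordiv (a + b) 2 := by
          by_contra hc
          exact hfm ((h _ (by omega) (by omega)).2 (by omega))
        exact ihn a _ (by omega) ha (by omega) haL hLm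
    · rw [if_neg hab]
      omega

-- ===== VERDICT (by name: the statement is the Claim_ definition above) =====
theorem snuke_the_wizard_spec : Claim_equal_snuke_the_wizard := by
  intro N Q s queries hDom hPre
  unfold Spec_snuke_the_wizard
  simp only [snuke_the_wizard, snuke_the_wizard_alt]
  by_cases hN : N ≤ 0
  · rw [foldl_fixed s.toList N hN queries.reverse, if_pos hN]
    simp only []
    split_ifs <;> omega
  · rw [if_neg hN]
    have hstA : (queries.reverse).foldl (stepA s.toList N) (-1, N) = stA s.toList N queries := rfl
    rw [hstA]
    obtain ⟨h1, h2, h3, h4⟩ := charac s.toList N (by omega) queries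
    set l := (stA s.toList N queries).1 with hldef
    set r := (stA s.toList N queries).2 with hrdef
    have hfate0 := h4 0 le_rfl (by omega)
    have hfateN := h4 (N - 1) (by omega) (by omega)
    have hlo : (if fateB s.toList N queries 0 ≠ -1 then (0:Int)
        else if fateB s.toList N queries (N - 1) = -1 then N
        else bsearchB (fun p => fateB s.toList N queries p == -1) 0 (N - 1)) = l + 1 := by
      split_ifs with hf0 hfN
      · have h0l : ¬ (0 ≤ l) := fun h => hf0 (hfate0.1.mpr h)
        omega
      · have := hfateN.1.mp hfN
        omega
      · have hf0' : 0 ≤ l := hfate0.1.mp (not_not.mp hf0)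
        have hfN' : ¬ (N - 1 ≤ l) := fun h => hfN (hfateN.1.mpr h)
        exact bsearchB_eq _ l 0 (N - 1)
          (fun p hp1 hp2 => by
            simp only [beq_iff_eq]
            exact (h4 p hp1 (by omega)).1)
          (N - 1).toNat 0 (N - 1) (by omega) le_rfl le_rfl hf0' (by omega)
    have hhi : (if fateB s.toList N queries (N - 1) ≠ 1 then N - 1
        else if fateB s.toList N queries 0 = 1 then (-1 : Int)
        else bsearchB (fun p => fateB s.toList N queries p != 1) 0 (N - 1) - 1) = r - 1 := by
      split_ifs with hfN hf0
      · have hrN : ¬ (r ≤ N - 1) := fun h => hfN (hfateN.2.mpr h)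
        omega
      · have := hfate0.2.mp hf0
        omega
      · have hfN' : r ≤ N - 1 := hfateN.2.mp (not_not.mp hfN)
        have hf0' : ¬ (r ≤ 0) := fun h => hf0 (hfate0.2.mpr h)
        have hb := bsearchB_eq (fun p => fateB s.toList N queries p != 1) (r - 1) 0 (N - 1)
          (fun p hp1 hp2 => by
            simp only [bne_iff_ne, ne_eq]
            rw [(h4 p hp1 (by omega)).2]
            omega)
          (N - 1).toNat 0 (N - 1) (by omega) le_rfl le_rfl (by omega) (by omega)
        rw [hb]
        ring
    rw [hlo, hhi, if_pos h2]
    split_ifs <;> omega
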